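-- pv_equiv track=rewrite | github.com/sarbeshtiwari/arc-agi-3 | environment_files/eg04/eg04.py | apply_mix
-- ===== SOURCE A (Python) =====
-- MIX_TABLE = {
--     ("R", "B"): "P",
--     ("B", "R"): "P",
--     ("B", "Y"): "G",
--     ("Y", "B"): "G",
--     ("R", "Y"): "O",
--     ("Y", "R"): "O",
-- }
--
-- def apply_mix(tokens, idx1, idx2):
--     if idx1 == idx2:
--         return None
--     if idx1 < 0 or idx1 >= len(tokens) or idx2 < 0 or idx2 >= len(tokens):
--         return None
--     t1 = tokens[idx1]
--     t2 = tokens[idx2]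
--     key = (t1, t2)
--     if key not in MIX_TABLE:
--         return None
--     result = MIX_TABLE[key]
--     new_tokens = []
--     lo = min(idx1, idx2)
--     hi = max(idx1, idx2)
--     for i, t in enumerate(tokens):
--         if i == lo:
--             new_tokens.append(result)
--         elif i == hi:
--             continue
--         else:
--             new_tokens.append(t)
--     return new_tokens
-- ===== SOURCE B (Python) =====
-- MIX_TABLE = {
--     ("R", "B"): "P",
--     ("B", "R"): "P",
--     ("B", "Y"): "G",
--     ("Y", "B"): "G",
--     ("R", "Y"): "O",
--     ("Y", "R"): "O",
-- }
--
-- def apply_mix(tokens, idx1, idx2):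
--     lo, hi = sorted((idx1, idx2))
--     if not (0 <= lo < hi < len(tokens)):
--         return None
--     result = MIX_TABLE.get((tokens[idx1], tokens[idx2]))
--     if result is None:
--         return None
--     return tokens[:lo] + [result] + tokens[lo + 1:hi] + tokens[hi + 1:]
-- ===== Notes on version B (the rewrite author's own statement) =====
-- stated objective: simpler
-- what changed: Collapses A's three guard clauses into one chained comparison on the sorted index pair and replaces the per-element enumerate loop with conditional appends by a single slice-concatenation expression tokens[:lo] + [result] + tokens[lo+1:hi] + tokens[hi+1:].
import Mathlib
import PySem

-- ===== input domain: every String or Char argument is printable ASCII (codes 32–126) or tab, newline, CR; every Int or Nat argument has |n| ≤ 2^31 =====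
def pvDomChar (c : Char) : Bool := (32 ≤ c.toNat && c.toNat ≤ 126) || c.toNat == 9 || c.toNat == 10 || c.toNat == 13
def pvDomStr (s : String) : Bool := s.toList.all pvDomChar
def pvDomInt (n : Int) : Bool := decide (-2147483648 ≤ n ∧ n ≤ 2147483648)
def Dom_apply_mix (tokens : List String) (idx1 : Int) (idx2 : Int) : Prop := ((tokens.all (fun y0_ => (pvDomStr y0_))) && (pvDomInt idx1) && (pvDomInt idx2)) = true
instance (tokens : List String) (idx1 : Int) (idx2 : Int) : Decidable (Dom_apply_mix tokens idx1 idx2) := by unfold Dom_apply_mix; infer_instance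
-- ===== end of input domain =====

-- B replaces A's guard chain and per-element enumerate loop by one chained bound check on the sorted pair and a slice-concatenation (simpler decomposition, same O(n) cost).


-- ===== PORT A =====
def MIX_TABLE : PySem.Dict (String × String) String :=
  PySem.Dict.ofList [(("R", "B"), "P"), (("B", "R"), "P"), (("B", "Y"), "G"),
                     (("Y", "B"), "G"), (("R", "Y"), "O"), (("Y", "R"), "O")]

def apply_mix (tokens : List String) (idx1 : Int) (idx2 : Int) : Option (List String) :=
  if idx1 = idx2 then none
  else if idx1 < 0 ∨ (tokens.length : Int) ≤ idx1 ∨ idx2 < 0 ∨ (tokens.length : Int) ≤ idx2 then none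
  else
    -- indices are guarded in range and nonnegative, so pyGetD with a dummy default is tokens[idx]
    let t1 := PySem.List.pyGetD tokens idx1 ""
    let t2 := PySem.List.pyGetD tokens idx2 ""
    match PySem.Dict.get? MIX_TABLE (t1, t2) with
    | none => none
    | some result =>
      let lo := min idx1 idx2
      let hi := max idx1 idx2
      let new_tokens := (PySem.List.enumerate tokens 0).foldl
        (fun acc p =>
          if p.1 = lo then acc ++ [result]
          else if p.1 = hi then acc
          else acc ++ [p.2]) []
      some new_tokens

-- ===== PORT B =====
def apply_mix_alt (tokens : List String) (idx1 : Int) (idx2 : Int) : Option (List String) :=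
  let lo := min idx1 idx2
  let hi := max idx1 idx2
  if 0 ≤ lo ∧ lo < hi ∧ hi < (tokens.length : Int) then
    -- after the chained bound check both indices are in range, so pyGetD with a dummy default is tokens[idx]
    (PySem.Dict.get? MIX_TABLE (PySem.List.pyGetD tokens idx1 "", PySem.List.pyGetD tokens idx2 "")).map
      (fun result =>
        PySem.List.slice tokens none (some lo) ++ [result] ++
        PySem.List.slice tokens (some (lo + 1)) (some hi) ++
        PySem.List.slice tokens (some (hi + 1)) none)
  else none

-- ===== PRECONDITION & SPEC =====
def Spec_apply_mix (tokens : List String) (idx1 : Int) (idx2 : Int) (out : Option (List String)) : Prop := out = apply_mix_alt tokens idx1 idx2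
instance (tokens : List String) (idx1 : Int) (idx2 : Int) (out : Option (List String)) : Decidable (Spec_apply_mix tokens idx1 idx2 out) := by unfold Spec_apply_mix; infer_instance

-- ===== CLAIM =====
def Claim_equal_apply_mix : Prop := ∀ (tokens : List String) (idx1 : Int) (idx2 : Int), Dom_apply_mix tokens idx1 idx2 → Spec_apply_mix tokens idx1 idx2 (apply_mix tokens idx1 idx2)

-- ===== LEMMAS AND PROOFS =====

-- Phase 1: after the index has passed hi, the loop copies the rest of the list.
theorem loop_past_hi (result : String) (lo hi : Int) (hlh : lo < hi) :
    ∀ (l : List String) (s : Int) (acc : List String), hi < s →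
    (PySem.List.enumerate l s).foldl
      (fun acc p => if p.1 = lo then acc ++ [result] else if p.1 = hi then acc else acc ++ [p.2]) acc
      = acc ++ l := by
  intro l
  induction l with
  | nil => intro s acc _; simp [PySem.List.enumerate_nil]
  | cons t ts ih =>
    intro s acc hs
    rw [PySem.List.enumerate_cons]
    have h1 : ¬ (s = lo) := by omega
    have h2 : ¬ (s = hi) := by omega
    simp only [List.foldl_cons, h1, h2, if_false]
    rw [ih (s + 1) (acc ++ [t]) (by omega)]
    simp

-- Phase 2: between lo (exclusive) and hi (inclusive), the loop keeps the prefix up to hi and the suffix after it.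
theorem loop_mid (result : String) (lo hi : Int) (hlh : lo < hi) :
    ∀ (l : List String) (s : Int) (acc : List String), lo < s → s ≤ hi →
    (PySem.List.enumerate l s).foldl
      (fun acc p => if p.1 = lo then acc ++ [result] else if p.1 = hi then acc else acc ++ [p.2]) acc
      = acc ++ l.take (hi - s).toNat ++ l.drop ((hi - s).toNat + 1) := by
  intro l
  induction l with
  | nil => intro s acc _ _; simp [PySem.List.enumerate_nil]
  | cons t ts ih =>
    intro s acc hls hsh
    rw [PySem.List.enumerate_cons]
    have h1 : ¬ (s = lo) := by omega
    simp only [List.foldl_cons, h1, if_false]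
    by_cases h2 : s = hi
    · simp only [h2, if_true]
      rw [loop_past_hi result lo hi hlh ts (hi + 1) acc (by omega)]
      simp
    · simp only [h2, if_false]
      rw [ih (s + 1) (acc ++ [t]) (by omega) (by omega)]
      have hk : (hi - s).toNat = (hi - (s + 1)).toNat + 1 := by omega
      simp [hk]

-- Phase 3: before lo, the loop produces prefix ++ [result] ++ middle ++ suffix.
theorem loop_full (result : String) (lo hi : Int) (hlh : lo < hi) :
    ∀ (l : List String) (s : Int) (acc : List String), s ≤ lo → lo < s + l.length →
    (PySem.List.enumerate l s).foldl
      (fun acc p => if p.1 = lo then acc ++ [result] else if p.1 = hi then acc else acc ++ [p.2]) acc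
      = acc ++ l.take (lo - s).toNat ++ [result] ++
        (l.drop ((lo - s).toNat + 1)).take ((hi - lo).toNat - 1) ++ l.drop ((hi - s).toNat + 1) := by
  intro l
  induction l with
  | nil => intro s acc _ hlt; simp at hlt; omega
  | cons t ts ih =>
    intro s acc hsl hlt
    rw [PySem.List.enumerate_cons]
    by_cases h1 : s = lo
    · simp only [h1, List.foldl_cons, if_true]
      rw [loop_mid result lo hi hlh ts (lo + 1) (acc ++ [result]) (by omega) (by omega)]
      have hk : (hi - lo).toNat - 1 = (hi - (lo + 1)).toNat := by omega
      have hk2 : (hi - lo).toNat + 1 = (hi - (lo + 1)).toNat + 1 + 1 := by omega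
      simp [hk, hk2]
    · have h2 : ¬ (s = hi) := by omega
      simp only [List.foldl_cons, h1, h2, if_false]
      rw [ih (s + 1) (acc ++ [t]) (by omega) (by simp at hlt ⊢; omega)]
      have hl : (lo - s).toNat = (lo - (s + 1)).toNat + 1 := by omega
      have hk : (hi - s).toNat = (hi - (s + 1)).toNat + 1 := by omega
      simp [hl, hk]

-- ===== VERDICT =====
theorem apply_mix_spec : Claim_equal_apply_mix := by
  intro tokens idx1 idx2 _
  unfold Spec_apply_mix apply_mix apply_mix_alt
  by_cases heq : idx1 = idx2
  · simp [heq]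
  · simp only [heq, if_false]
    by_cases hb : idx1 < 0 ∨ (tokens.length : Int) ≤ idx1 ∨ idx2 < 0 ∨ (tokens.length : Int) ≤ idx2
    · have hg : ¬ (0 ≤ min idx1 idx2 ∧ min idx1 idx2 < max idx1 idx2 ∧ max idx1 idx2 < (tokens.length : Int)) := by omega
      simp only [hb, if_true, hg, if_false]
    · have hg : 0 ≤ min idx1 idx2 ∧ min idx1 idx2 < max idx1 idx2 ∧ max idx1 idx2 < (tokens.length : Int) := by omega
      simp only [hb, if_false, hg]
      cases hget : PySem.Dict.get? MIX_TABLE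
          (PySem.List.pyGetD tokens idx1 "", PySem.List.pyGetD tokens idx2 "") with
      | none => simp
      | some result =>
        have hlh : min idx1 idx2 < max idx1 idx2 := hg.2.1
        have hfold := loop_full result (min idx1 idx2) (max idx1 idx2) hlh tokens 0 [] hg.1 (by omega)
        simp only [Option.map_some, hfold]
        rw [PySem.List.slice_to tokens hg.1,
            PySem.List.slice_toNat tokens (by omega) (by omega),
            PySem.List.slice_from tokens (by omega)]
        have e1 : (min idx1 idx2 + 1).toNat = (min idx1 idx2 - 0).toNat + 1 := by omega
        have e3 : (max idx1 idx2 + 1).toNat = (max idx1 idx2 - 0).toNat + 1 := by omega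
        simp [e1, e3]
        omega
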